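-- pv_equiv track=rewrite | github.com/YuanWind/daGuanCup | mlm_train/process_oov_data.py | process_oov_record
-- ===== SOURCE A (Python) =====
-- def process_oov_record(record, normal_vocab,
--                        idmap,
--                        min_frequence=5,
--                        min_oov_word_idx=35000):
--     text_a = record
--     tokens_a = text_a.split()
--     oov_word_map = {}
--     cur_oov_idx = min_oov_word_idx
--     for tokens in [tokens_a]:
--         for i in range(len(tokens)):
--             if normal_vocab.get(tokens[i], 0) < min_frequence:
--                 if tokens[i] not in oov_word_map:
--                     oov_word_map[tokens[i]] = str(cur_oov_idx)
--                     cur_oov_idx += 1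
--                 tokens[i] = oov_word_map[tokens[i]]
--             else:
--                 tokens[i] = idmap[tokens[i]]
--     return " ".join(tokens_a)
-- ===== SOURCE B (Python) =====
-- def process_oov_record(record, normal_vocab,
--                        idmap,
--                        min_frequence=5,
--                        min_oov_word_idx=35000):
--     tokens = record.split()
--     # pass 1: assign sequential ids to distinct OOV tokens in first-appearance order
--     oov_word_map = {}
--     for tok in tokens:
--         if normal_vocab.get(tok, 0) < min_frequence and tok not in oov_word_map:
--             oov_word_map[tok] = str(min_oov_word_idx + len(oov_word_map))
--     # pass 2: map each token left-to-right
--     out = []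
--     for tok in tokens:
--         if normal_vocab.get(tok, 0) < min_frequence:
--             out.append(oov_word_map[tok])
--         else:
--             out.append(idmap[tok])
--     return " ".join(out)
-- ===== Notes on version B (the rewrite author's own statement) =====
-- stated objective: simpler
-- what changed: Replaces A's single in-place pass mutating the token list while threading a three-part state (map, counter, list) by two independent passes: one that builds the OOV map, deriving each id from the map's current size instead of a separate counter, and one pure mapping pass that produces a fresh output list.
import Mathlib
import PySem

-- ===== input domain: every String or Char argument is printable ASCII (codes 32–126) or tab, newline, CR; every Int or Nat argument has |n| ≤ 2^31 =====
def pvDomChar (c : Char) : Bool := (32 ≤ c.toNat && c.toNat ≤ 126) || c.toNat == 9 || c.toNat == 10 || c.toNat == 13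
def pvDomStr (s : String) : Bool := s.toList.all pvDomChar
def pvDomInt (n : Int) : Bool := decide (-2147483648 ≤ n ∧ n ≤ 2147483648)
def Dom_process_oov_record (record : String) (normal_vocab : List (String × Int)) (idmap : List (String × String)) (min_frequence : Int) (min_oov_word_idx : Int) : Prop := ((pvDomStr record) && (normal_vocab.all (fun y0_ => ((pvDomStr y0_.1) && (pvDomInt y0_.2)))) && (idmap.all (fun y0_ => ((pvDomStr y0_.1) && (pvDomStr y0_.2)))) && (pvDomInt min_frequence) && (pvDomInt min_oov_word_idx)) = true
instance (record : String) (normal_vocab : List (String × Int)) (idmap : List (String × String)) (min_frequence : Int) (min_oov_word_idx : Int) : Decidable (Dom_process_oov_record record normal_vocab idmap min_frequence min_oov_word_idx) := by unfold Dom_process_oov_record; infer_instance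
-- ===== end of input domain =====

-- ===== PORT A =====
-- B replaces A's single mutating pass threading (map, counter, out-list) by two independent passes (simpler decomposition).
def process_oov_record (record : String) (normal_vocab : List (String × Int)) (idmap : List (String × String)) (min_frequence : Int) (min_oov_word_idx : Int) : String :=
  let nv := PySem.Dict.ofList normal_vocab
  let im := PySem.Dict.ofList idmap
  let tokens_a := PySem.Str.split₀ record
  -- the for-loop over range(len(tokens)) rewriting tokens[i] in place, as a fold over (rewritten-prefix, oov_word_map, cur_oov_idx)
  let st := tokens_a.foldl
    (fun (acc : List String × PySem.Dict String String × Int) tok =>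
      let (out, m, c) := acc
      if nv.getD tok 0 < min_frequence then
        if m.contains tok then (out ++ [m.getD tok ""], m, c)
        else
          let m' := m.insert tok (PySem.Int.toStr c)
          (out ++ [m'.getD tok ""], m', c + 1)
      else (out ++ [im.getD tok ""], m, c))
    ([], PySem.Dict.empty, min_oov_word_idx)
  PySem.Str.join " " st.1

-- ===== PORT B =====
-- pass 1 of Source B: the OOV map, each id derived from the map's current size
def pvBuildOov (nv : PySem.Dict String Int) (min_frequence : Int) (min_oov_word_idx : Int) (tokens : List String) : PySem.Dict String String :=
  tokens.foldl
    (fun m tok =>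
      if nv.getD tok 0 < min_frequence ∧ ¬ m.contains tok then
        m.insert tok (PySem.Int.toStr (min_oov_word_idx + (m.size : Int)))
      else m)
    PySem.Dict.empty

def process_oov_record_alt (record : String) (normal_vocab : List (String × Int)) (idmap : List (String × String)) (min_frequence : Int) (min_oov_word_idx : Int) : String :=
  let nv := PySem.Dict.ofList normal_vocab
  let im := PySem.Dict.ofList idmap
  let tokens := PySem.Str.split₀ record
  let oov := pvBuildOov nv min_frequence min_oov_word_idx tokens
  -- pass 2 of Source B: map each token left to right
  PySem.Str.join " "
    (tokens.map (fun tok =>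
      if nv.getD tok 0 < min_frequence then oov.getD tok "" else im.getD tok ""))

-- ===== PRECONDITION & SPEC =====
-- Pre_ excludes exactly the inputs where Python A raises KeyError: a token with frequency ≥ min_frequence that is missing from idmap.
def Pre_process_oov_record (record : String) (normal_vocab : List (String × Int)) (idmap : List (String × String)) (min_frequence : Int) (min_oov_word_idx : Int) : Prop :=
  ((PySem.Str.split₀ record).all (fun tok =>
    decide ((PySem.Dict.ofList normal_vocab).getD tok 0 < min_frequence)
      || (PySem.Dict.ofList idmap).contains tok)) = true
instance (record : String) (normal_vocab : List (String × Int)) (idmap : List (String × String)) (min_frequence : Int) (min_oov_word_idx : Int) : Decidable (Pre_process_oov_record record normal_vocab idmap min_frequence min_oov_word_idx) := by unfold Pre_process_oov_record; infer_instance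

def pvWitness_process_oov_record : String × (List (String × Int)) × (List (String × String)) × Int × Int :=
  ("a b a", [("b", 10)], [("b", "1")], 5, 35000)

def Spec_process_oov_record (record : String) (normal_vocab : List (String × Int)) (idmap : List (String × String)) (min_frequence : Int) (min_oov_word_idx : Int) (out : String) : Prop := out = process_oov_record_alt record normal_vocab idmap min_frequence min_oov_word_idx
instance (record : String) (normal_vocab : List (String × Int)) (idmap : List (String × String)) (min_frequence : Int) (min_oov_word_idx : Int) (out : String) : Decidable (Spec_process_oov_record record normal_vocab idmap min_frequence min_oov_word_idx out) := by unfold Spec_process_oov_record; infer_instance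

-- ===== CLAIM (what is proved, stated in full; the proofs are below) =====
def Claim_equal_process_oov_record : Prop := ∀ (record : String) (normal_vocab : List (String × Int)) (idmap : List (String × String)) (min_frequence : Int) (min_oov_word_idx : Int), Dom_process_oov_record record normal_vocab idmap min_frequence min_oov_word_idx → Pre_process_oov_record record normal_vocab idmap min_frequence min_oov_word_idx → Spec_process_oov_record record normal_vocab idmap min_frequence min_oov_word_idx (process_oov_record record normal_vocab idmap min_frequence min_oov_word_idx)

-- ===== LEMMAS AND PROOFS =====

-- pass 1 of B never touches a key that is already present
theorem pvBuildOov_getD_of_contains (nv : PySem.Dict String Int) (mf base : Int)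
    (ts : List String) (m : PySem.Dict String String) (t : String)
    (h : m.contains t = true) :
    (ts.foldl (fun m tok => if nv.getD tok 0 < mf ∧ ¬ m.contains tok then
        m.insert tok (PySem.Int.toStr (base + (m.size : Int))) else m) m).getD t ""
      = m.getD t "" := by
  induction ts generalizing m with
  | nil => rfl
  | cons u ts ih =>
    simp only [List.foldl_cons]
    split_ifs with hc
    · have hne : t ≠ u := by rintro rfl; exact hc.2 h
      rw [ih _ (by simp [PySem.Dict.contains_insert, h]),
        PySem.Dict.getD_insert_of_ne _ _ _ hne]
    · exact ih _ h

-- A's fold, started at any map with the counter in step with it (c = base + size), equals B's two passes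
theorem pvFold_eq (nv : PySem.Dict String Int) (im : PySem.Dict String String)
    (mf base : Int) (ts : List String) (m : PySem.Dict String String) (out : List String) :
    ts.foldl
      (fun (acc : List String × PySem.Dict String String × Int) tok =>
        let (o, mm, c) := acc
        if nv.getD tok 0 < mf then
          if mm.contains tok then (o ++ [mm.getD tok ""], mm, c)
          else
            let m' := mm.insert tok (PySem.Int.toStr c)
            (o ++ [m'.getD tok ""], m', c + 1)
        else (o ++ [im.getD tok ""], mm, c))
      (out, m, base + (m.size : Int))
    = (out ++ ts.map (fun tok =>
        if nv.getD tok 0 < mf then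
          (ts.foldl (fun m tok => if nv.getD tok 0 < mf ∧ ¬ m.contains tok then
              m.insert tok (PySem.Int.toStr (base + (m.size : Int))) else m) m).getD tok ""
        else im.getD tok ""),
       ts.foldl (fun m tok => if nv.getD tok 0 < mf ∧ ¬ m.contains tok then
          m.insert tok (PySem.Int.toStr (base + (m.size : Int))) else m) m,
       base + ((ts.foldl (fun m tok => if nv.getD tok 0 < mf ∧ ¬ m.contains tok then
          m.insert tok (PySem.Int.toStr (base + (m.size : Int))) else m) m).size : Int)) := by
  induction ts generalizing m out with
  | nil => simp
  | cons t ts ih =>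
    simp only [List.foldl_cons, List.map_cons]
    by_cases hf : nv.getD t 0 < mf
    · by_cases hc : m.contains t = true
      · have hstep : (if nv.getD t 0 < mf ∧ ¬ m.contains t then
            m.insert t (PySem.Int.toStr (base + (m.size : Int))) else m) = m := by
          simp [hf, hc]
        rw [hstep]
        simp only [hf, hc, if_true]
        rw [ih m (out ++ [m.getD t ""]),
          pvBuildOov_getD_of_contains nv mf base ts m t hc]
        simp
      · have hc' : m.contains t = false := by simpa using hc
        have hstep : (if nv.getD t 0 < mf ∧ ¬ m.contains t then
            m.insert t (PySem.Int.toStr (base + (m.size : Int))) else m)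
            = m.insert t (PySem.Int.toStr (base + (m.size : Int))) := by
          simp [hf, hc']
        rw [hstep]
        simp only [hf, hc', if_true, Bool.false_eq_true, ite_false]
        have hsz : (base + (m.size : Int)) + 1
            = base + (((m.insert t (PySem.Int.toStr (base + (m.size : Int)))).size : Int)) := by
          rw [PySem.Dict.size_insert]
          simp only [hc', Bool.false_eq_true, if_false]
          push_cast; ring
        rw [hsz, ih (m.insert t (PySem.Int.toStr (base + (m.size : Int))))
              (out ++ [(m.insert t (PySem.Int.toStr (base + (m.size : Int)))).getD t ""]),
          pvBuildOov_getD_of_contains nv mf base ts _ t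
            (by simp)]
        simp
    · have hstep : (if nv.getD t 0 < mf ∧ ¬ m.contains t then
          m.insert t (PySem.Int.toStr (base + (m.size : Int))) else m) = m := by
        simp [hf]
      rw [hstep]
      simp only [hf, ite_false]
      rw [ih m (out ++ [im.getD t ""])]
      simp

-- ===== VERDICT (by name: the statement is the Claim_ definition above) =====
theorem process_oov_record_spec : Claim_equal_process_oov_record := by
  intro record normal_vocab idmap mf base _ _
  unfold Spec_process_oov_record process_oov_record process_oov_record_alt pvBuildOov
  have h := pvFold_eq (PySem.Dict.ofList normal_vocab) (PySem.Dict.ofList idmap)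
    mf base (PySem.Str.split₀ record) PySem.Dict.empty []
  have h0 : base + (((PySem.Dict.empty : PySem.Dict String String).size : Nat) : Int) = base := by
    simp
  rw [h0] at h
  simpa using congrArg (fun p : List String × PySem.Dict String String × Int =>
    PySem.Str.join " " p.1) h
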